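-- pv_equiv track=rewrite | github.com/Lazr22/Video2Summary | src/transcription/merger.py | _char_at_word_start
-- ===== SOURCE A (Python) =====
-- def _char_at_word_start(text: str, word_n: int) -> int:
--     """
--     Character index where the word_n-th word (0-indexed) starts.
--     Walks positionally — no substring search, safe with repeated words.
--     """
--     i = 0
--     n = len(text)
--
--     # Skip leading whitespace
--     while i < n and text[i] == ' ':
--         i += 1
--
--     for _ in range(word_n):
--         # Skip over the current word
--         while i < n and text[i] != ' ':
--             i += 1
--         # Skip whitespace between words
--         while i < n and text[i] == ' ':
--             i += 1
--
--     return i  # start of word_n, or len(text) if past the end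
-- ===== SOURCE B (Python) =====
-- def _char_at_word_start(text: str, word_n: int) -> int:
--     """Index-then-lookup: build the list of word-start indices once, clamp, look up."""
--     starts = [i for i, (prev, c) in enumerate(zip(' ' + text, text))
--               if c != ' ' and prev == ' ']
--     w = word_n if word_n > 0 else 0
--     return starts[w] if w < len(starts) else len(text)
-- ===== Notes on version B (the rewrite author's own statement) =====
-- stated objective: idiomatic
-- what changed: Replaces A's nested positional skip-loops (skip word / skip gap, word_n times) by building the list of word-start indices in one pass and indexing into it with a clamped index, defaulting to len(text).
import Mathlib
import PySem

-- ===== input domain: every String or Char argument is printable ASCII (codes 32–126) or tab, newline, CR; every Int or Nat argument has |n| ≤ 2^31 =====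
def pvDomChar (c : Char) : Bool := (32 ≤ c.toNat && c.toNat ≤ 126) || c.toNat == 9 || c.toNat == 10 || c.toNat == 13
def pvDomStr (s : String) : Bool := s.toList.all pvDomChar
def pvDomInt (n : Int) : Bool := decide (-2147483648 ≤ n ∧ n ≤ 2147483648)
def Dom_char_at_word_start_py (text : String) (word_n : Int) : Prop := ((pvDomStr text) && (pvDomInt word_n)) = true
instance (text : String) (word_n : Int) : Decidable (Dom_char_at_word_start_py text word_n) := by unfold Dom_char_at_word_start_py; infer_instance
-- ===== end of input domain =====

-- B replaces A's nested positional skip-loops by building the list of word-start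
-- indices in one pass and indexing into it (clamped, default len(text)); objective: idiomatic.

-- ===== PORT A =====
-- while i < n and text[i] == ' ': i += 1   (walked as the suffix at i, tracking i)
def pvSkipSp : List Char → Nat → List Char × Nat
  | c :: rest, i => if c = ' ' then pvSkipSp rest (i + 1) else (c :: rest, i)
  | [], i => ([], i)

-- while i < n and text[i] != ' ': i += 1
def pvSkipWd : List Char → Nat → List Char × Nat
  | c :: rest, i => if c = ' ' then (c :: rest, i) else pvSkipWd rest (i + 1)
  | [], i => ([], i)

-- for _ in range(word_n): skip word, then skip spaces
def pvLoopA : Nat → List Char → Nat → Nat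
  | 0, _, i => i
  | k + 1, cs, i =>
    let p := pvSkipWd cs i
    let q := pvSkipSp p.1 p.2
    pvLoopA k q.1 q.2

def char_at_word_start_py (text : String) (word_n : Int) : Int :=
  let cs := text.toList
  let p := pvSkipSp cs 0
  (pvLoopA word_n.toNat p.1 p.2 : Int)

-- ===== PORT B =====
def char_at_word_start_py_alt (text : String) (word_n : Int) : Int :=
  let cs := text.toList
  -- starts = [i for i, (prev, c) in enumerate(zip(' ' + text, text)) if c != ' ' and prev == ' ']
  let starts := ((((' ' :: cs).zip cs).zipIdx).filter
      (fun p => p.1.2 != ' ' && p.1.1 == ' ')).map (fun p => p.2)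
  -- w = word_n if word_n > 0 else 0
  let w : Nat := if word_n > 0 then word_n.toNat else 0
  -- starts[w] if w < len(starts) else len(text)
  if w < starts.length then ((starts.getD w 0 : Nat) : Int) else ((cs.length : Nat) : Int)

-- ===== PRECONDITION & SPEC =====
def Spec_char_at_word_start_py (text : String) (word_n : Int) (out : Int) : Prop := out = char_at_word_start_py_alt text word_n
instance (text : String) (word_n : Int) (out : Int) : Decidable (Spec_char_at_word_start_py text word_n out) := by unfold Spec_char_at_word_start_py; infer_instance

-- ===== CLAIM (what is proved, stated in full; the proofs are below) =====
def Claim_equal_char_at_word_start_py : Prop := ∀ (text : String) (word_n : Int), Dom_char_at_word_start_py text word_n → Spec_char_at_word_start_py text word_n (char_at_word_start_py text word_n)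

-- ===== LEMMAS AND PROOFS =====

-- reference list of word-start indices, prev-char style
def pvStartsFrom : Char → List Char → Nat → List Nat
  | prev, c :: rest, i =>
    (if c ≠ ' ' ∧ prev = ' ' then [i] else []) ++ pvStartsFrom c rest (i + 1)
  | _, [], _ => []

theorem pvStarts_eq_zip (cs : List Char) (prev : Char) (i : Nat) :
    (((((prev :: cs).zip cs).zipIdx i).filter
      (fun p => p.1.2 != ' ' && p.1.1 == ' ')).map (fun p => p.2))
    = pvStartsFrom prev cs i := by
  induction cs generalizing prev i with
  | nil => simp [pvStartsFrom]
  | cons c rest ih =>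
    simp only [List.zip_cons_cons, List.zipIdx_cons, List.filter_cons, pvStartsFrom]
    by_cases h1 : c = ' ' <;> by_cases h2 : prev = ' ' <;>
      simp [h1, h2, ih]

-- length preservation of the skip phases
theorem pvSkipSp_len (cs : List Char) (i : Nat) :
    (pvSkipSp cs i).2 + (pvSkipSp cs i).1.length = i + cs.length := by
  induction cs generalizing i with
  | nil => simp [pvSkipSp]
  | cons c rest ih =>
    by_cases h : c = ' ' <;> simp [pvSkipSp, h, ih (i + 1)] <;> omega

theorem pvSkipWd_len (cs : List Char) (i : Nat) :
    (pvSkipWd cs i).2 + (pvSkipWd cs i).1.length = i + cs.length := by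
  induction cs generalizing i with
  | nil => simp [pvSkipWd]
  | cons c rest ih =>
    by_cases h : c = ' ' <;> simp [pvSkipWd, h, ih (i + 1)] <;> omega

-- the suffix after skipping spaces is empty or starts with a non-space char
theorem pvSkipSp_head (cs : List Char) (i : Nat) :
    (pvSkipSp cs i).1 = [] ∨ ∃ c rest, (pvSkipSp cs i).1 = c :: rest ∧ c ≠ ' ' := by
  induction cs generalizing i with
  | nil => left; simp [pvSkipSp]
  | cons c rest ih =>
    by_cases h : c = ' '
    · simpa [pvSkipSp, h] using ih (i + 1)
    · right; exact ⟨c, rest, by simp [pvSkipSp, h], h⟩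

-- the suffix after skipping a word is empty or starts with a space
theorem pvSkipWd_head (cs : List Char) (i : Nat) :
    (pvSkipWd cs i).1 = [] ∨ ∃ rest, (pvSkipWd cs i).1 = ' ' :: rest := by
  induction cs generalizing i with
  | nil => left; simp [pvSkipWd]
  | cons c rest ih =>
    by_cases h : c = ' '
    · right; exact ⟨rest, by simp [pvSkipWd, h]⟩
    · simpa [pvSkipWd, h] using ih (i + 1)

-- skipping a word leaves the remaining starts unchanged (prev non-space)
theorem pvStartsFrom_skipWd (cs : List Char) (i : Nat) (prev : Char) (hp : prev ≠ ' ') :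
    pvStartsFrom prev cs i = pvStartsFrom 'a' (pvSkipWd cs i).1 (pvSkipWd cs i).2 := by
  induction cs generalizing i prev with
  | nil => simp [pvSkipWd, pvStartsFrom]
  | cons c rest ih =>
    by_cases h : c = ' '
    · simp [pvSkipWd, pvStartsFrom, h, hp]
    · simpa [pvSkipWd, pvStartsFrom, h, hp] using ih (i + 1) c h

-- prev is irrelevant when the suffix is empty or space-headed
theorem pvStartsFrom_prev_irrel (cs : List Char) (i : Nat) (p q : Char)
    (h : cs = [] ∨ ∃ rest, cs = ' ' :: rest) :
    pvStartsFrom p cs i = pvStartsFrom q cs i := by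
  rcases h with h | ⟨rest, h⟩ <;> subst h <;> simp [pvStartsFrom]

-- skipping spaces leaves the starts unchanged (prev space)
theorem pvStartsFrom_skipSp (cs : List Char) (i : Nat) :
    pvStartsFrom ' ' cs i = pvStartsFrom ' ' (pvSkipSp cs i).1 (pvSkipSp cs i).2 := by
  induction cs generalizing i with
  | nil => simp [pvSkipSp]
  | cons c rest ih =>
    by_cases h : c = ' '
    · simpa [pvSkipSp, pvStartsFrom, h] using ih (i + 1)
    · simp [pvSkipSp, h]

-- one word step: head start plus the starts after skipping word and gap
theorem pvStartsFrom_step (c : Char) (rest : List Char) (i : Nat) (hc : c ≠ ' ') :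
    pvStartsFrom ' ' (c :: rest) i
      = i :: pvStartsFrom ' '
          (pvSkipSp (pvSkipWd (c :: rest) i).1 (pvSkipWd (c :: rest) i).2).1
          (pvSkipSp (pvSkipWd (c :: rest) i).1 (pvSkipWd (c :: rest) i).2).2 := by
  have h1 : pvStartsFrom ' ' (c :: rest) i = i :: pvStartsFrom c rest (i + 1) := by
    simp [pvStartsFrom, hc]
  have h2 := pvStartsFrom_skipWd rest (i + 1) c hc
  have h3 := pvStartsFrom_prev_irrel (pvSkipWd rest (i + 1)).1 (pvSkipWd rest (i + 1)).2
      'a' ' ' (pvSkipWd_head rest (i + 1))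
  have h4 := pvStartsFrom_skipSp (pvSkipWd rest (i + 1)).1 (pvSkipWd rest (i + 1)).2
  have h5 : pvSkipWd (c :: rest) i = pvSkipWd rest (i + 1) := by simp [pvSkipWd, hc]
  rw [h1, h2, h3, h4, h5]

-- main invariant: A's loop indexes into the starts list, default = end index
theorem pvLoopA_eq (k : Nat) (cs : List Char) (i : Nat)
    (h : cs = [] ∨ ∃ c rest, cs = c :: rest ∧ c ≠ ' ') :
    pvLoopA k cs i = (pvStartsFrom ' ' cs i).getD k (i + cs.length) := by
  induction k generalizing cs i with
  | zero =>
    rcases h with h | ⟨c, rest, h, hc⟩ <;> subst h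
    · simp [pvLoopA, pvStartsFrom]
    · simp [pvLoopA, pvStartsFrom, hc]
  | succ k ih =>
    rcases h with h | ⟨c, rest, h, hc⟩ <;> subst h
    · simp [pvLoopA, pvSkipWd, pvSkipSp, pvStartsFrom] at *
      simpa [pvSkipWd, pvSkipSp] using ih [] i (Or.inl rfl)
    · rw [pvStartsFrom_step c rest i hc]
      have hlen : (pvSkipSp (pvSkipWd (c :: rest) i).1 (pvSkipWd (c :: rest) i).2).2
          + (pvSkipSp (pvSkipWd (c :: rest) i).1 (pvSkipWd (c :: rest) i).2).1.length
          = i + (c :: rest).length := by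
        have := pvSkipSp_len (pvSkipWd (c :: rest) i).1 (pvSkipWd (c :: rest) i).2
        have := pvSkipWd_len (c :: rest) i
        omega
      have hh := pvSkipSp_head (pvSkipWd (c :: rest) i).1 (pvSkipWd (c :: rest) i).2
      have := ih (pvSkipSp (pvSkipWd (c :: rest) i).1 (pvSkipWd (c :: rest) i).2).1
          (pvSkipSp (pvSkipWd (c :: rest) i).1 (pvSkipWd (c :: rest) i).2).2 hh
      simp only [pvLoopA, List.getD_cons_succ]
      rw [this, hlen]

-- ===== VERDICT (by name: the statement is the Claim_ definition above) =====
theorem char_at_word_start_py_spec : Claim_equal_char_at_word_start_py := by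
  intro text word_n _
  unfold Spec_char_at_word_start_py char_at_word_start_py char_at_word_start_py_alt
  simp only [pvStarts_eq_zip]
  set cs := text.toList with hcs
  have hw : (if word_n > 0 then word_n.toNat else 0) = word_n.toNat := by
    by_cases h : word_n > 0 <;> simp [h] <;> omega
  rw [hw]
  have h0 := pvSkipSp_head cs 0
  have hlen := pvSkipSp_len cs 0
  rw [pvLoopA_eq word_n.toNat (pvSkipSp cs 0).1 (pvSkipSp cs 0).2 h0]
  rw [pvStartsFrom_skipSp cs 0]
  set S := pvStartsFrom ' ' (pvSkipSp cs 0).1 (pvSkipSp cs 0).2 with hS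
  by_cases h : word_n.toNat < S.length
  · simp only [h, if_true]
    rw [List.getD_eq_getElem S _ h, List.getD_eq_getElem S _ h]
  · simp only [h, if_false]
    rw [List.getD_eq_default S _ (by omega)]
    congr 1
    omega
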